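-- pv_equiv track=rewrite | github.com/AaryanCode69/SamVadXR_Build_India_Hack_Context_Engine | app/prompts/vendor_system.py | _count_turns_in_current_stage
-- ===== SOURCE A (Python) =====
-- from typing import Any
--
-- def _count_turns_in_current_stage(
--     turns: list[dict[str, Any]],
--     current_stage: str,
-- ) -> int:
--     """Count how many consecutive recent turns are in the current stage."""
--     count = 0
--     for turn in reversed(turns):
--         if turn.get("stage") == current_stage:
--             count += 1
--         else:
--             break
--     return count
-- ===== SOURCE B (Python) =====
-- def _count_turns_in_current_stage(
--     turns: list,
--     current_stage: str,
-- ) -> int: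
--     """Count how many consecutive recent turns are in the current stage."""
--     last_mismatch = -1
--     for i, turn in enumerate(turns):
--         if turn.get("stage") != current_stage:
--             last_mismatch = i
--     return len(turns) - 1 - last_mismatch
-- ===== Notes on version B (the rewrite author's own statement) =====
-- stated objective: alternative
-- what changed: Replaced the reversed iteration with an early break by a single forward enumerate pass that records the last mismatching index and returns len(turns) - 1 - last_mismatch.
import Mathlib
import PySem

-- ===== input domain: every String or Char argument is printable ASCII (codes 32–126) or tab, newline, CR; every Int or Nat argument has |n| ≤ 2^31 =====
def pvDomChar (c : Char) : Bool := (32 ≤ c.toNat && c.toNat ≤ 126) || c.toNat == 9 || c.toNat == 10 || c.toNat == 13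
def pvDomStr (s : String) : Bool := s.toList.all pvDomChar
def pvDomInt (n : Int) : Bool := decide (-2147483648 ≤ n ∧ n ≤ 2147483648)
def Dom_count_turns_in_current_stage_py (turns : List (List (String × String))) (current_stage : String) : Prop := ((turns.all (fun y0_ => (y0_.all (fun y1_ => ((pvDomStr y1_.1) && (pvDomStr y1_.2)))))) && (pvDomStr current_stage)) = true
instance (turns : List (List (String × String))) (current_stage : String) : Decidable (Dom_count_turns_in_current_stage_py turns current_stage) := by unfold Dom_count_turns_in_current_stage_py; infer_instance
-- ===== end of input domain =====

-- B replaces A's reversed iteration with an early break by one forward enumerate pass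
-- recording the last mismatching index (objective: alternative decomposition).


-- turn.get("stage") : first-match lookup in the association list (dict convention)
def pvStageGet (turn : List (String × String)) : Option String :=
  (turn.find? (fun p => p.1 == "stage")).map (·.2)

-- ===== PORT A =====
-- the 'for turn in reversed(turns): … else: break' loop, as structural recursion on the reversed list
def pvCountLoopA (current_stage : String) : List (List (String × String)) → Int
  | [] => 0
  | t :: rest =>
      if pvStageGet t == some current_stage then 1 + pvCountLoopA current_stage rest else 0

def count_turns_in_current_stage_py (turns : List (List (String × String))) (current_stage : String) : Int :=
  pvCountLoopA current_stage turns.reverse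

-- ===== PORT B =====
def count_turns_in_current_stage_py_alt (turns : List (List (String × String))) (current_stage : String) : Int :=
  let last_mismatch : Int :=
    (PySem.List.enumerate turns 0).foldl
      (fun acc it => if ¬ (pvStageGet it.2 == some current_stage) then it.1 else acc) (-1)
  (turns.length : Int) - 1 - last_mismatch

-- ===== PRECONDITION & SPEC =====
def Spec_count_turns_in_current_stage_py (turns : List (List (String × String))) (current_stage : String) (out : Int) : Prop := out = count_turns_in_current_stage_py_alt turns current_stage
instance (turns : List (List (String × String))) (current_stage : String) (out : Int) : Decidable (Spec_count_turns_in_current_stage_py turns current_stage out) := by unfold Spec_count_turns_in_current_stage_py; infer_instance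

-- ===== CLAIM (what is proved, stated in full; the proofs are below) =====
def Claim_equal_count_turns_in_current_stage_py : Prop := ∀ (turns : List (List (String × String))) (current_stage : String), Dom_count_turns_in_current_stage_py turns current_stage → Spec_count_turns_in_current_stage_py turns current_stage (count_turns_in_current_stage_py turns current_stage)

-- ===== LEMMAS AND PROOFS =====

-- the key invariant, proved by induction on the list from the right
theorem pvCount_eq (cs : String) (turns : List (List (String × String))) :
    pvCountLoopA cs turns.reverse =
      (turns.length : Int) - 1 -
        (PySem.List.enumerate turns 0).foldl
          (fun acc it => if ¬ (pvStageGet it.2 == some cs) then it.1 else acc) (-1) := by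
  induction turns using List.reverseRecOn with
  | nil => simp [pvCountLoopA, PySem.List.enumerate]
  | append_singleton xs x ih =>
      rw [List.reverse_append]
      simp only [List.reverse_singleton, List.singleton_append,
        PySem.List.enumerate_append, List.foldl_append, List.length_append,
        List.length_singleton]
      by_cases h : pvStageGet x == some cs
      · simp only [pvCountLoopA, h, PySem.List.enumerate, List.foldl_cons, List.foldl_nil,
          not_true_eq_false, if_false, if_true, ih]
        push_cast
        ring
      · have h' : pvStageGet x ≠ some cs := by simpa using h
        simp [pvCountLoopA, h', PySem.List.enumerate]

-- ===== VERDICT (by name: the statement is the Claim_ definition above) =====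
theorem count_turns_in_current_stage_py_spec : Claim_equal_count_turns_in_current_stage_py := by
  intro turns cs _
  unfold Spec_count_turns_in_current_stage_py count_turns_in_current_stage_py
    count_turns_in_current_stage_py_alt
  exact pvCount_eq cs turns
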